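-- pv_equiv track=rewrite | github.com/NattSiraOsvn/Natt-Os_SignSira | tools/dialect-cipher/dialect_cipher_translator.py | split_onset_rime
-- ===== SOURCE A (Python) =====
-- ONSETS_LONG = ['ngh', 'qu', 'gi', 'ng', 'nh', 'ph', 'kh', 'gh', 'th', 'tr', 'ch']
--
-- ONSETS_SHORT = list('bcdđghklmnpqrstvx')
--
-- def split_onset_rime(syllable):
--     lower = syllable.lower()
--     for o in ONSETS_LONG:
--         if lower.startswith(o):
--             return syllable[:len(o)], syllable[len(o):]
--     if lower and lower[0] in ONSETS_SHORT:
--         return syllable[:1], syllable[1:]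
--     return '', syllable
-- ===== SOURCE B (Python) =====
-- ONSETS_LONG = ['ngh', 'qu', 'gi', 'ng', 'nh', 'ph', 'kh', 'gh', 'th', 'tr', 'ch']
--
-- ONSETS_SHORT = list('bcdđghklmnpqrstvx')
--
-- _ONSETS_BY_LEN = {
--     3: {'ngh'},
--     2: {o for o in ONSETS_LONG if len(o) == 2},
--     1: set(ONSETS_SHORT),
-- }
--
-- def split_onset_rime(syllable):
--     lower = syllable.lower()
--     for length in (3, 2, 1):
--         if lower[:length] in _ONSETS_BY_LEN[length]:
--             return syllable[:length], syllable[length:]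
--     return '', syllable
-- ===== Notes on version B (the rewrite author's own statement) =====
-- stated objective: idiomatic
-- what changed: B replaces the linear scan over the 11-entry onset list (plus a separate single-letter branch) with a longest-prefix-first loop over candidate lengths 3,2,1, testing the lowercased prefix against a precomputed set of onsets per length.
import Mathlib
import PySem

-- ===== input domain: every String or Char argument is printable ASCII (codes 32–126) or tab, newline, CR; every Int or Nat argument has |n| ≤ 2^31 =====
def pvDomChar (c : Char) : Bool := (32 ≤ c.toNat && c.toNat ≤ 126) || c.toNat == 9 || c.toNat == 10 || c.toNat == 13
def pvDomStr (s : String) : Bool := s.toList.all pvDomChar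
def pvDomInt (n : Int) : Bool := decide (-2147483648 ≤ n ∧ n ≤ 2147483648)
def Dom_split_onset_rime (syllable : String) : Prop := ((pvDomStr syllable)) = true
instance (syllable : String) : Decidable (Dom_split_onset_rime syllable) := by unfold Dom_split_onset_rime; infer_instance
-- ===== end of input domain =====

-- B replaces A's linear scan over the onset list by a longest-prefix-first loop over candidate
-- lengths 3, 2, 1 with one precomputed set of onsets per length (objective: idiomatic).

-- ===== PORT A =====
def ONSETS_LONG : List String := ["ngh","qu","gi","ng","nh","ph","kh","gh","th","tr","ch"]
def ONSETS_SHORT : List Char := "bcdđghklmnpqrstvx".toList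

def splitOnsetLoop (syllable lower : String) : List String → String × String
  | [] =>
    match lower.toList with
    | [] => ("", syllable)
    | c :: _ =>
      if ONSETS_SHORT.contains c then
        (PySem.Str.slice syllable none (some 1), PySem.Str.slice syllable (some 1) none)
      else ("", syllable)
  | o :: rest =>
    if PySem.Str.startswith lower o then
      (PySem.Str.slice syllable none (some (PySem.Str.len o)),
       PySem.Str.slice syllable (some (PySem.Str.len o)) none)
    else splitOnsetLoop syllable lower rest

def split_onset_rime (syllable : String) : String × String :=
  splitOnsetLoop syllable (PySem.Str.lower syllable) ONSETS_LONG

-- ===== PORT B =====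
def ONSETS_BY_LEN : List (Int × PySem.Set String) :=
  [(3, PySem.Set.ofList ["ngh"]),
   (2, PySem.Set.ofList (ONSETS_LONG.filter fun o => PySem.Str.len o == 2)),
   (1, PySem.Set.ofList (ONSETS_SHORT.map fun c => String.ofList [c]))]

def splitByLen (syllable lower : String) : List (Int × PySem.Set String) → String × String
  | [] => ("", syllable)
  | (L, st) :: rest =>
    if PySem.Set.contains st (PySem.Str.slice lower none (some L)) then
      (PySem.Str.slice syllable none (some L), PySem.Str.slice syllable (some L) none)
    else splitByLen syllable lower rest

def split_onset_rime_alt (syllable : String) : String × String :=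
  splitByLen syllable (PySem.Str.lower syllable) ONSETS_BY_LEN


-- ===== PRECONDITION & SPEC =====
def Spec_split_onset_rime (syllable : String) (out : String × String) : Prop := out = split_onset_rime_alt syllable
instance (syllable : String) (out : String × String) : Decidable (Spec_split_onset_rime syllable out) := by unfold Spec_split_onset_rime; infer_instance

-- ===== CLAIM (what is proved, stated in full; the proofs are below) =====
def Claim_equal_split_onset_rime : Prop := ∀ (syllable : String), Dom_split_onset_rime syllable → Spec_split_onset_rime syllable (split_onset_rime syllable)

-- ===== LEMMAS AND PROOFS =====

-- slice lo [:n] equals a literal string ↔ take n of toList equals its chars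
lemma slice_eq_lit (lo o : String) (n : ℕ) :
    PySem.Str.slice lo none (some (n : ℤ)) = o ↔ lo.toList.take n = o.toList := by
  rw [← String.toList_inj, PySem.Str.toList_slice, PySem.Chars.slice_eq_listSlice,
      PySem.List.slice_to_natCast]

lemma sw_eq_take (lo o : String) :
    PySem.Str.startswith lo o = true ↔ lo.toList.take o.toList.length = o.toList := by
  rw [PySem.Str.startswith_eq, PySem.Chars.startswith_iff, List.prefix_iff_eq_take, eq_comm]

lemma loopA_two (s lo : String) (os : List String) (h2 : ∀ o ∈ os, o.toList.length = 2) :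
    splitOnsetLoop s lo os =
      if lo.toList.take 2 ∈ os.map String.toList then
        (PySem.Str.slice s none (some 2), PySem.Str.slice s (some 2) none)
      else splitOnsetLoop s lo [] := by
  induction os with
  | nil => simp
  | cons o rest ih =>
    have ho : o.toList.length = 2 := h2 o (by simp)
    by_cases h : PySem.Str.startswith lo o = true
    · have ht : List.take 2 lo.toList = o.toList := by
        rw [← ho]; exact (sw_eq_take lo o).mp h
      have hm : List.take 2 lo.toList ∈ (o :: rest).map String.toList := by simp [ht]
      conv_lhs => rw [splitOnsetLoop]
      rw [if_pos hm, if_pos h, PySem.Str.len_eq, ho]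
      norm_num
    · have hne : List.take 2 lo.toList ≠ o.toList := by
        intro he; exact h ((sw_eq_take lo o).mpr (by rw [ho]; exact he))
      conv_lhs => rw [splitOnsetLoop]
      rw [if_neg h, ih (fun o' ho' => h2 o' (List.mem_cons_of_mem _ ho'))]
      simp only [List.map_cons, List.mem_cons, hne, false_or]

lemma slice_toList (lo : String) (n : ℕ) :
    (PySem.Str.slice lo none (some (n : ℤ))).toList = lo.toList.take n := by
  rw [PySem.Str.toList_slice, PySem.Chars.slice_eq_listSlice, PySem.List.slice_to_natCast]

lemma slice_mem_map (lo : String) (n : ℕ) (L : List String) :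
    PySem.Str.slice lo none (some (n : ℤ)) ∈ L ↔ lo.toList.take n ∈ L.map String.toList := by
  constructor
  · intro h; exact List.mem_map.mpr ⟨_, h, slice_toList lo n⟩
  · intro h
    obtain ⟨o, ho, he⟩ := List.mem_map.mp h
    rwa [show o = PySem.Str.slice lo none (some (n : ℤ)) from
      String.toList_inj.mp (by rw [he, slice_toList])] at ho

def TWO_LIST : List String := ["qu","gi","ng","nh","ph","kh","gh","th","tr","ch"]


lemma ofList_single_inj (a c : Char) (h : String.ofList [a] = String.ofList [c]) : a = c := by
  have := congrArg String.toList h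
  simpa using this

lemma short_case (s lo : String) :
    splitOnsetLoop s lo [] =
      splitByLen s lo [((1:ℤ), PySem.Set.ofList (ONSETS_SHORT.map fun c => String.ofList [c]))] := by
  have hsl : (PySem.Str.slice lo none (some (1:ℤ))).toList = lo.toList.take 1 := by
    have h := slice_toList lo 1
    rwa [Nat.cast_one] at h
  rw [splitOnsetLoop, splitByLen, splitByLen]
  rcases hl : lo.toList with _ | ⟨c, rest⟩
  · have he : PySem.Str.slice lo none (some (1:ℤ)) = "" :=
      String.toList_inj.mp (by rw [hsl, hl]; rfl)
    have hf : (PySem.Set.ofList (ONSETS_SHORT.map fun c => String.ofList [c])).contains "" = false := by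
      decide
    rw [he, hf]
    rfl
  · have he : PySem.Str.slice lo none (some (1:ℤ)) = String.ofList [c] :=
      String.toList_inj.mp (by rw [String.toList_ofList, hsl, hl]; rfl)
    have hAB : (PySem.Set.ofList (ONSETS_SHORT.map fun c => String.ofList [c])).contains (String.ofList [c])
        = ONSETS_SHORT.contains c := by
      rw [Bool.eq_iff_iff, PySem.Set.contains_iff, PySem.Set.mem_ofList, List.contains_iff_mem]
      constructor
      · intro hm
        obtain ⟨d, hd, he2⟩ := List.mem_map.mp hm
        exact (ofList_single_inj d c he2) ▸ hd
      · intro hc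
        exact List.mem_map.mpr ⟨c, hc, rfl⟩
    rw [he, hAB]

theorem main2 (s lo : String) :
    splitOnsetLoop s lo ONSETS_LONG = splitByLen s lo ONSETS_BY_LEN := by
  have hfil : ONSETS_LONG.filter (fun o => PySem.Str.len o == 2) = TWO_LIST := by decide
  have hset2 : PySem.Set.ofList TWO_LIST = TWO_LIST := by decide
  conv_rhs => rw [ONSETS_BY_LEN, hfil, hset2]
  conv_lhs => rw [show ONSETS_LONG = "ngh" :: TWO_LIST from rfl]
  rw [splitOnsetLoop, splitByLen]
  by_cases h3 : List.take 3 lo.toList = "ngh".toList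
  · have hA : PySem.Str.startswith lo "ngh" = true := (sw_eq_take lo "ngh").mpr h3
    have hB : PySem.Set.contains (PySem.Set.ofList ["ngh"]) (PySem.Str.slice lo none (some 3)) = true := by
      rw [PySem.Set.contains_iff]
      have : PySem.Str.slice lo none (some ((3:ℕ) : ℤ)) = "ngh" := (slice_eq_lit lo "ngh" 3).mpr h3
      norm_num at this
      simp [this, PySem.Set.mem_ofList]
    rw [if_pos hA, if_pos hB]
    have hl3 : (PySem.Str.len "ngh") = (3 : ℤ) := by decide
    rw [hl3]
  · have hA : ¬ PySem.Str.startswith lo "ngh" = true := fun h => h3 ((sw_eq_take lo "ngh").mp h)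
    have hB : ¬ PySem.Set.contains (PySem.Set.ofList ["ngh"]) (PySem.Str.slice lo none (some 3)) = true := by
      rw [PySem.Set.contains_iff, PySem.Set.mem_ofList]
      intro hm
      apply h3
      have := (slice_eq_lit lo "ngh" 3).mp (by norm_num; simpa using hm)
      exact this
    rw [if_neg hA, if_neg hB, splitByLen,
        loopA_two s lo TWO_LIST (by decide)]
    by_cases h2 : List.take 2 lo.toList ∈ TWO_LIST.map String.toList
    · have hB2 : PySem.Set.contains TWO_LIST (PySem.Str.slice lo none (some 2)) = true := by
        rw [PySem.Set.contains_iff]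
        have := (slice_mem_map lo 2 TWO_LIST).mpr h2
        norm_num at this; exact this
      rw [if_pos h2, if_pos hB2]
    · have hB2 : ¬ PySem.Set.contains TWO_LIST (PySem.Str.slice lo none (some 2)) = true := by
        rw [PySem.Set.contains_iff]
        intro hm
        exact h2 ((slice_mem_map lo 2 TWO_LIST).mp (by norm_num at hm ⊢; exact hm))
      rw [if_neg h2, if_neg hB2]
      exact short_case s lo

-- ===== VERDICT (by name: the statement is the Claim_ definition above) =====
theorem split_onset_rime_spec : Claim_equal_split_onset_rime := by
  intro s _
  show split_onset_rime s = split_onset_rime_alt s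
  rw [split_onset_rime, split_onset_rime_alt]
  exact main2 s (PySem.Str.lower s)
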